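-- pv_equiv track=rewrite | github.com/diyaravishankar/DSA-Practice | Karan/Greedy/Maximal Score After Applying K Operations.py | maxKelements
-- ===== SOURCE A (Python) =====
-- import heapq
-- import math
--
-- def maxKelements(nums, k):
--     max_heap = [-num for num in nums]
--     heapq.heapify(max_heap)
--     score = 0
--     for _ in range(k):
--         max_val = -heapq.heappop(max_heap)
--         score += max_val
--         heapq.heappush(max_heap, -math.ceil(max_val / 3))
--     return score
--
-- nums = [1,10,3,3,3]
--
-- k = 3
-- ===== SOURCE B (Python) =====
-- import math
--
-- def maxKelements(nums, k):
--     # Keep a sorted (ascending) working list: the maximum is the last element,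
--     # and ceil(m/3) is re-inserted at its ordered position.
--     lst = sorted(nums)
--     score = 0
--     for _ in range(k):
--         m = lst.pop()          # largest element (list is sorted ascending)
--         score += m
--         c = math.ceil(m / 3)
--         i = 0
--         while i < len(lst) and lst[i] < c:
--             i += 1
--         lst.insert(i, c)
--     return score
-- ===== Notes on version B (the rewrite author's own statement) =====
-- stated objective: alternative
-- what changed: Replaces the negated min-heap (heapify/heappop/heappush) by a list kept sorted ascending: pop the last element as the maximum and re-insert ceil(m/3) at its ordered position by a linear scan.
-- outside the precondition, e.g. on maxKelements([], 1): A raises IndexError, B raises IndexError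
import Mathlib
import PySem

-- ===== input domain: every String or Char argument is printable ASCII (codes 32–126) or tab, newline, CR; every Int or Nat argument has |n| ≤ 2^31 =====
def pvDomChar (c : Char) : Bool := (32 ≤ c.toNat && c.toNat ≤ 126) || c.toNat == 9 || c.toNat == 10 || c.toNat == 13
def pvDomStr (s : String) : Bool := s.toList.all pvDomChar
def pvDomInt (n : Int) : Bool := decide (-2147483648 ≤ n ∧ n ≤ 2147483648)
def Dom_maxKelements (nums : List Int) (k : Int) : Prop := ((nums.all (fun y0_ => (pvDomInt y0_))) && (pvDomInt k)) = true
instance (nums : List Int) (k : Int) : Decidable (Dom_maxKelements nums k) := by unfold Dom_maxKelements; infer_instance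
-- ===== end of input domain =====

-- B replaces A's negated min-heap by a list kept sorted ascending: pop the last element as the
-- maximum and re-insert ceil(m/3) at its ordered position (alternative data structure, no heap);
-- equivalence is about the return value only (neither version mutates its argument observably).

-- math.ceil(a / 3): exact integer ceiling; on the stated domain (|values| ≤ 2^31) the float
-- division a/3 is close enough that math.ceil(a/3) == integer ceiling, ported exactly here.
def pvCeil3 (a : Int) : Int := -(PySem.Int.floordiv (-a) 3)

-- ===== PORT A =====
-- heapq on a list of Ints: heapify preserves the multiset; heappop returns the minimum value and
-- removes one occurrence of it; heappush adds the value. Ported at the value level (heap = its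
-- multiset of Ints): min? + erase + cons — exact, since only the popped VALUES reach the result.
def maxKelementsGoA (fuel : Nat) (heap : List Int) (score : Int) : Int :=
  match fuel with
  | 0 => score
  | n+1 =>
    let m := (PySem.List.min? heap (fun y => y)).getD 0   -- heappop (value); [] would raise: Pre_ excludes it
    let maxVal := -m
    maxKelementsGoA n ((-(pvCeil3 maxVal)) :: heap.erase m) (score + maxVal)

def maxKelements (nums : List Int) (k : Int) : Int :=
  maxKelementsGoA k.toNat (nums.map (fun num => -num)) 0

-- ===== PORT B =====
-- Source B's inner while/insert: walk past the elements < c, insert c there (ordered insert).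
def pvInsSorted (c : Int) : List Int → List Int
  | [] => [c]
  | x :: xs => if x < c then x :: pvInsSorted c xs else c :: x :: xs

def maxKelementsGoB (fuel : Nat) (lst : List Int) (score : Int) : Int :=
  match fuel with
  | 0 => score
  | n+1 =>
    let m := lst.getLast?.getD 0                          -- lst.pop(); [] would raise: Pre_ excludes it
    maxKelementsGoB n (pvInsSorted (pvCeil3 m) lst.dropLast) (score + m)

def maxKelements_alt (nums : List Int) (k : Int) : Int :=
  maxKelementsGoB k.toNat (PySem.List.sorted nums (fun y => y) false) 0

-- ===== PRECONDITION & SPEC =====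
-- Pre_ excludes only empty nums with k > 0, where A raises IndexError (heappop on empty heap);
-- B raises IndexError (pop from empty list) there too.
def Pre_maxKelements (nums : List Int) (k : Int) : Prop := nums ≠ [] ∨ k ≤ 0
instance (nums : List Int) (k : Int) : Decidable (Pre_maxKelements nums k) := by unfold Pre_maxKelements; infer_instance

def pvWitness_maxKelements : List Int × Int := ([1, 10, 3, 3, 3], 3)

def Spec_maxKelements (nums : List Int) (k : Int) (out : Int) : Prop := out = maxKelements_alt nums k
instance (nums : List Int) (k : Int) (out : Int) : Decidable (Spec_maxKelements nums k out) := by unfold Spec_maxKelements; infer_instance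

-- ===== CLAIM (what is proved, stated in full; the proofs are below) =====
def Claim_equal_maxKelements : Prop := ∀ (nums : List Int) (k : Int), Dom_maxKelements nums k → Pre_maxKelements nums k → Spec_maxKelements nums k (maxKelements nums k)

-- ===== LEMMAS AND PROOFS =====

-- ordered insert is a cons, up to permutation
theorem insSorted_perm (c : Int) : ∀ (l : List Int), (pvInsSorted c l).Perm (c :: l) := by
  intro l
  induction l with
  | nil => simp [pvInsSorted]
  | cons x xs ih =>
    by_cases h : x < c
    · simp only [pvInsSorted, if_pos h]
      exact (ih.cons x).trans (List.Perm.swap c x xs)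
    · simp [pvInsSorted, if_neg h]

-- ordered insert preserves ascending sortedness
theorem insSorted_pairwise (c : Int) : ∀ (l : List Int),
    l.Pairwise (· ≤ ·) → (pvInsSorted c l).Pairwise (· ≤ ·) := by
  intro l
  induction l with
  | nil => intro _; simp [pvInsSorted]
  | cons x xs ih =>
    intro hp
    rw [List.pairwise_cons] at hp
    by_cases h : x < c
    · simp only [pvInsSorted, if_pos h]
      rw [List.pairwise_cons]
      refine ⟨?_, ih hp.2⟩
      intro y hy
      rcases List.mem_cons.mp ((insSorted_perm c xs).mem_iff.mp hy) with h1 | h1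
      · omega
      · exact hp.1 y h1
    · simp only [pvInsSorted, if_neg h]
      rw [List.pairwise_cons]
      refine ⟨?_, List.pairwise_cons.mpr hp⟩
      intro y hy
      rcases List.mem_cons.mp hy with h1 | h1
      · omega
      · have := hp.1 y h1; omega

-- the last element of a nonempty ascending list is a maximum
theorem getLast_is_max {l : List Int} {M : Int}
    (hp : l.Pairwise (· ≤ ·)) (hM : l.getLast? = some M) : M ∈ l ∧ ∀ y ∈ l, y ≤ M := by
  induction l with
  | nil => simp at hM
  | cons x xs ih =>
    rw [List.pairwise_cons] at hp
    cases xs with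
    | nil =>
      simp [List.getLast?] at hM
      subst hM; simp
    | cons z zs =>
      rw [List.getLast?_cons_cons] at hM
      obtain ⟨hmem, hmax⟩ := ih hp.2 hM
      refine ⟨List.mem_cons_of_mem _ hmem, ?_⟩
      intro y hy
      rcases List.mem_cons.mp hy with h1 | h1
      · subst h1; exact hp.1 M hmem
      · exact hmax y h1
  
-- the minimum of the negated multiset is the negation of the maximum
theorem min?_of_perm_neg {heap lst : List Int} {M : Int}
    (hp : heap.Perm (lst.map (fun x => -x)))
    (hMmem : M ∈ lst) (hMtop : ∀ y ∈ lst, y ≤ M) :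
    PySem.List.min? heap (fun y => y) = some (-M) := by
  have hne : heap ≠ [] := by
    intro h; subst h
    have := hp.symm.eq_nil
    simp [List.map_eq_nil_iff] at this
    subst this; simp at hMmem
  obtain ⟨m, hm⟩ : ∃ m, PySem.List.min? heap (fun y => y) = some m := by
    cases h : PySem.List.min? heap (fun y => y) with
    | none => exact absurd ((Iff.mp (PySem.List.min?_eq_none_iff _ _) h)) hne
    | some m => exact ⟨m, rfl⟩
  have hmmem : m ∈ heap := PySem.List.min?_mem hm
  have hmbot : ∀ y ∈ heap, m ≤ y := fun y hy => PySem.List.min?_isMin hm y hy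
  have h1 : -M ≤ m := by
    have : m ∈ lst.map (fun x => -x) := hp.mem_iff.mp hmmem
    obtain ⟨x, hx, hxm⟩ := List.mem_map.mp this
    have := hMtop x hx; omega
  have h2 : m ≤ -M := by
    apply hmbot
    exact hp.mem_iff.mpr (List.mem_map.mpr ⟨M, hMmem, rfl⟩)
  rw [hm]; congr 1; omega

-- main loop invariant: A's heap is (as a multiset) the negation of B's sorted list
theorem go_eq : ∀ (n : Nat) (heap lst : List Int) (score : Int),
    lst ≠ [] → lst.Pairwise (· ≤ ·) → heap.Perm (lst.map (fun x => -x)) →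
    maxKelementsGoA n heap score = maxKelementsGoB n lst score := by
  intro n
  induction n with
  | zero => intro heap lst score _ _ _; rfl
  | succ n ih =>
    intro heap lst score hne hsorted hp
    obtain ⟨M, hM⟩ : ∃ M, lst.getLast? = some M := by
      cases h : lst.getLast? with
      | none => exact absurd (List.getLast?_eq_none_iff.mp h) hne
      | some M => exact ⟨M, rfl⟩
    obtain ⟨hMmem, hMtop⟩ := getLast_is_max hsorted hM
    have hmin := min?_of_perm_neg hp hMmem hMtop
    obtain ⟨l', hsplit⟩ := List.getLast?_eq_some_iff.mp hM
    subst hsplit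
    simp only [maxKelementsGoA, maxKelementsGoB, hmin, hM, Option.getD_some,
               List.dropLast_concat]
    have hperm' : ((-(pvCeil3 M)) :: heap.erase (-M)).Perm
        ((pvInsSorted (pvCeil3 M) l').map (fun x => -x)) := by
      have hmemheap : -M ∈ heap := hp.mem_iff.mpr (List.mem_map.mpr ⟨M, hMmem, rfl⟩)
      have herase : (heap.erase (-M)).Perm (l'.map (fun x => -x)) := by
        have h1 : ((-M) :: heap.erase (-M)).Perm ((-M) :: l'.map (fun x => -x)) := by
          refine (List.perm_cons_erase hmemheap).symm.trans (hp.trans ?_)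
          rw [List.map_append]
          simp
        exact h1.cons_inv
      have step1 : ((-(pvCeil3 M)) :: heap.erase (-M)).Perm
          ((((pvCeil3 M) :: l')).map (fun x => -x)) := by
        simpa using herase.cons (-(pvCeil3 M))
      exact step1.trans ((insSorted_perm (pvCeil3 M) l').map _).symm
    have hsorted' : (pvInsSorted (pvCeil3 M) l').Pairwise (· ≤ ·) :=
      insSorted_pairwise _ _ ((List.pairwise_append.mp hsorted).1)
    have hne' : pvInsSorted (pvCeil3 M) l' ≠ [] := by
      cases h : l' <;> simp [pvInsSorted]
      split <;> simp
    simp only [neg_neg]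
    exact ih _ _ _ hne' hsorted' hperm'

-- ===== VERDICT (by name: the statement is the Claim_ definition above) =====
theorem maxKelements_spec : Claim_equal_maxKelements := by
  intro nums k _ hpre
  unfold Spec_maxKelements maxKelements maxKelements_alt
  rcases hpre with hne | hk
  · refine go_eq k.toNat _ _ 0 ?_ ?_ ?_
    · simp [PySem.List.sorted_eq_nil_iff, hne]
    · simpa using PySem.List.sorted_pairwise nums (fun y => y)
    · exact ((PySem.List.sorted_perm nums (fun y => y) false).map _).symm
  · have : k.toNat = 0 := by omega
    rw [this]; rfl
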